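-- pv_equiv track=rewrite | github.com/tbonesteaks/algorithms | DTSA_5501_Homework1.py | oneStepKWayMerge
-- ===== SOURCE A (Python) =====
-- def twoWayMerge(lst1, lst2):
--     # Implement the two way merge algorithm on
--     #          two ascending order sorted lists
--     # return a fresh ascending order sorted list that
--     #          merges lst1 and lst2
--     cl,i,j = 0,0,0
--     tmp = []
--     while i < len(lst1) and j < len(lst2):
--         if lst1[i]<lst2[j]:
--             tmp.append(lst1[i])
--             i +=1
--         else:
--             tmp.append(lst2[j])
--             j +=1
--     if i < len(lst1):
--         tmp = tmp + lst1[i:]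
--     if j < len(lst2):
--         tmp = tmp + lst2[j:]
--     return tmp
--
-- def oneStepKWayMerge(list_of_lists):
--     if (len(list_of_lists) <= 1):
--         return list_of_lists
--     ret_list_of_lists = []
--     k = len(list_of_lists)
--     for i in range(0, k, 2):
--         if (i < k-1):
--             ret_list_of_lists.append(twoWayMerge(list_of_lists[i], list_of_lists[i+1]))
--         else:
--             ret_list_of_lists.append(list_of_lists[k-1])
--     return ret_list_of_lists
-- ===== SOURCE B (Python) =====
-- def twoWayMerge(lst1, lst2):
--     # consume reversed copies destructively from their tails; ties take lst2's element
--     rest1, rest2 = lst1[::-1], lst2[::-1]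
--     out = []
--     while rest1 and rest2:
--         out.append(rest2.pop() if rest2[-1] <= rest1[-1] else rest1.pop())
--     out += rest1[::-1]
--     out += rest2[::-1]
--     return out
--
-- def oneStepKWayMerge(list_of_lists):
--     it = iter(list_of_lists)
--     merged = [twoWayMerge(x, y) for x, y in zip(it, it)]
--     if len(list_of_lists) % 2:
--         merged.append(list_of_lists[-1])
--     return merged
-- ===== Notes on version B (the rewrite author's own statement) =====
-- stated objective: idiomatic
-- what changed: The stepped index range with an in-loop boundary branch is replaced by zip-over-one-iterator pair chunking plus a single odd-tail append, and the merge's two-index scan with remainder slices is replaced by destructive pops from the tails of reversed copies with remainders appended by reversal.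
import Mathlib
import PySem

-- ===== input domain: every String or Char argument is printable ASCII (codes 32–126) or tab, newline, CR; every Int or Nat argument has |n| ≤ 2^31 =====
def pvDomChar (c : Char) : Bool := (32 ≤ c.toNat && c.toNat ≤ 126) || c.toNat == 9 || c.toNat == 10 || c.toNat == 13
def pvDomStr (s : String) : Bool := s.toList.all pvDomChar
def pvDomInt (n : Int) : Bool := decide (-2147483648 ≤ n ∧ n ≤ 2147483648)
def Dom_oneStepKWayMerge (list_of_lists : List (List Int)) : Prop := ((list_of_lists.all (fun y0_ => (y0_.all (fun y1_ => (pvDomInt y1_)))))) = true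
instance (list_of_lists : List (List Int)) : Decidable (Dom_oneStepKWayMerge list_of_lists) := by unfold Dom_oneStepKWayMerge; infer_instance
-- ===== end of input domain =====

-- B is an index-free restatement: pairs are chunked by a zip over one iterator instead of a
-- stepped index range with an in-loop boundary branch, and the merge consumes reversed copies
-- destructively from their tails instead of advancing two indices (idiomatic, not faster).

-- ===== PORT A =====
-- the while loop of twoWayMerge: state (i, j, tmp); indices are always in range, so
-- getElem with the proof from the guard is exact
def twoWayMergeLoop (lst1 lst2 : List Int) (i j : Nat) (tmp : List Int) : List Int × Nat × Nat :=
  if h : i < lst1.length ∧ j < lst2.length then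
    if lst1[i]'h.1 < lst2[j]'h.2 then twoWayMergeLoop lst1 lst2 (i+1) j (tmp ++ [lst1[i]'h.1])
    else twoWayMergeLoop lst1 lst2 i (j+1) (tmp ++ [lst2[j]'h.2])
  else (tmp, i, j)
termination_by lst1.length - i + (lst2.length - j)
decreasing_by all_goals omega

def twoWayMerge (lst1 lst2 : List Int) : List Int :=
  match twoWayMergeLoop lst1 lst2 0 0 [] with
  | (tmp, i, j) =>
    let tmp1 := if i < lst1.length then tmp ++ PySem.List.slice lst1 (some (i:Int)) none else tmp
    if j < lst2.length then tmp1 ++ PySem.List.slice lst2 (some (j:Int)) none else tmp1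

-- list_of_lists[i] with i always in range: pyGetD is exact here
def oneStepKWayMerge (list_of_lists : List (List Int)) : List (List Int) :=
  if list_of_lists.length ≤ 1 then list_of_lists
  else
    let k : Int := list_of_lists.length
    (PySem.List.pyRange 0 k 2).foldl
      (fun ret i =>
        if i < k - 1 then
          ret ++ [twoWayMerge (PySem.List.pyGetD list_of_lists i [])
                              (PySem.List.pyGetD list_of_lists (i+1) [])]
        else ret ++ [PySem.List.pyGetD list_of_lists (k-1) []]) []

-- ===== PORT B =====
-- the while loop of B's twoWayMerge: rest1/rest2 are the reversed copies, '.pop()' reads the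
-- last element and drops it; lst[::-1] is exactly List.reverse
def twoWayMergeAltLoop (rest1 rest2 out : List Int) : List Int :=
  if h : rest1 ≠ [] ∧ rest2 ≠ [] then
    if rest2.getLast h.2 ≤ rest1.getLast h.1 then
      twoWayMergeAltLoop rest1 rest2.dropLast (out ++ [rest2.getLast h.2])
    else
      twoWayMergeAltLoop rest1.dropLast rest2 (out ++ [rest1.getLast h.1])
  else out ++ rest1.reverse ++ rest2.reverse
termination_by rest1.length + rest2.length
decreasing_by
  all_goals
    have h1 := List.length_pos_iff.mpr h.1
    have h2 := List.length_pos_iff.mpr h.2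
    simp [List.length_dropLast]; omega

def twoWayMergeAlt (lst1 lst2 : List Int) : List Int :=
  twoWayMergeAltLoop lst1.reverse lst2.reverse []

-- zip(it, it) over one iterator: consecutive disjoint pairs, a leftover odd element is dropped
def pairsOf : List (List Int) → List (List Int × List Int)
  | x :: y :: rest => (x, y) :: pairsOf rest
  | _ => []

-- list_of_lists[-1] is only read when the length is odd (hence ≥ 1): pyGetD is exact here
def oneStepKWayMerge_alt (list_of_lists : List (List Int)) : List (List Int) :=
  let merged := (pairsOf list_of_lists).map (fun p => twoWayMergeAlt p.1 p.2)
  if list_of_lists.length % 2 == 1 then merged ++ [PySem.List.pyGetD list_of_lists (-1) []]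
  else merged

-- ===== PRECONDITION & SPEC =====
def Spec_oneStepKWayMerge (list_of_lists : List (List Int)) (out : List (List Int)) : Prop := out = oneStepKWayMerge_alt list_of_lists
instance (list_of_lists : List (List Int)) (out : List (List Int)) : Decidable (Spec_oneStepKWayMerge list_of_lists out) := by unfold Spec_oneStepKWayMerge; infer_instance

-- ===== CLAIM (what is proved, stated in full; the proofs are below) =====
def Claim_equal_oneStepKWayMerge : Prop := ∀ (list_of_lists : List (List Int)), Dom_oneStepKWayMerge list_of_lists → Spec_oneStepKWayMerge list_of_lists (oneStepKWayMerge list_of_lists)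

-- ===== LEMMAS AND PROOFS =====

-- reference recursive merge (proof-only): both A's index loop and B's pop loop compute it
def mrg : List Int → List Int → List Int
  | [], l2 => l2
  | l1, [] => l1
  | a :: as, b :: bs => if a < b then a :: mrg as (b :: bs) else b :: mrg (a :: as) bs

theorem mrg_nil_right (l : List Int) : mrg l [] = l := by cases l <;> simp [mrg]

theorem loop_finish (lst1 lst2 : List Int) (i j : Nat) (tmp : List Int) :
    (match twoWayMergeLoop lst1 lst2 i j tmp with
     | (t, i', j') =>
       let tmp1 := if i' < lst1.length then t ++ PySem.List.slice lst1 (some (i':Int)) none else t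
       if j' < lst2.length then tmp1 ++ PySem.List.slice lst2 (some (j':Int)) none else tmp1)
    = tmp ++ mrg (lst1.drop i) (lst2.drop j) := by
  fun_induction twoWayMergeLoop lst1 lst2 i j tmp with
  | case1 i j tmp h hlt ih =>
    rw [ih, List.drop_eq_getElem_cons h.1, List.drop_eq_getElem_cons h.2, mrg]
    simp [hlt]
  | case2 i j tmp h hlt ih =>
    rw [ih, List.drop_eq_getElem_cons h.1, List.drop_eq_getElem_cons h.2, mrg]
    simp [hlt]
  | case3 i j tmp h =>
    push Not at h
    by_cases hi : i < lst1.length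
    · have hj : lst2.length ≤ j := h hi
      have : lst2.drop j = [] := List.drop_eq_nil_of_le hj
      simp [hi, Nat.not_lt.mpr hj, this, mrg_nil_right,
        PySem.List.slice_from lst1 (a := (i:Int)) (by positivity)]
    · have : lst1.drop i = [] := List.drop_eq_nil_of_le (Nat.not_lt.mp hi)
      by_cases hj : j < lst2.length
      · simp [hi, hj, this, mrg, PySem.List.slice_from lst2 (a := (j:Int)) (by positivity)]
      · simp [hi, hj, this, List.drop_eq_nil_of_le (Nat.not_lt.mp hj), mrg]

theorem twoWayMerge_eq_mrg (l1 l2 : List Int) : twoWayMerge l1 l2 = mrg l1 l2 := by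
  have := loop_finish l1 l2 0 0 []
  simpa [twoWayMerge] using this

theorem reverse_ne_nil_eq {α : Type} (l : List α) (h : l ≠ []) :
    l.reverse = l.getLast h :: l.dropLast.reverse := by
  conv_lhs => rw [← List.dropLast_append_getLast h]
  simp

theorem altLoop_eq_mrg (rest1 rest2 out : List Int) :
    twoWayMergeAltLoop rest1 rest2 out = out ++ mrg rest1.reverse rest2.reverse := by
  fun_induction twoWayMergeAltLoop rest1 rest2 out with
  | case1 r1 r2 out h hle ih =>
    rw [ih, reverse_ne_nil_eq r1 h.1, reverse_ne_nil_eq r2 h.2, mrg,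
      if_neg (by omega), ← reverse_ne_nil_eq r1 h.1]
    simp
  | case2 r1 r2 out h hle ih =>
    rw [ih, reverse_ne_nil_eq r1 h.1, reverse_ne_nil_eq r2 h.2, mrg,
      if_pos (by omega), ← reverse_ne_nil_eq r2 h.2]
    simp
  | case3 r1 r2 out h =>
    push Not at h
    by_cases h1 : r1 = []
    · simp [h1, mrg]
    · simp [h h1, mrg_nil_right]

theorem twoWayMerge_eq_alt : twoWayMerge = twoWayMergeAlt := by
  funext l1 l2
  rw [twoWayMerge_eq_mrg]
  simp [twoWayMergeAlt, altLoop_eq_mrg]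

theorem pairs_map (f : List Int → List Int → List Int) (l : List (List Int)) :
    (List.range (l.length/2)).map (fun t => f (l.getD (2*t) []) (l.getD (2*t+1) []))
      = (pairsOf l).map (fun p => f p.1 p.2) := by
  fun_induction pairsOf l with
  | case1 x y rest ih =>
    have hlen : (x :: y :: rest).length / 2 = rest.length / 2 + 1 := by simp; omega
    rw [hlen, List.range_succ_eq_map, List.map_cons, List.map_map, List.map_cons]
    refine congrArg₂ _ (by simp) ?_
    rw [← ih]
    refine List.map_congr_left (fun t _ => ?_)
    have e1 : 2 * Nat.succ t = (2 * t + 1) + 1 := by omega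
    have e2 : 2 * Nat.succ t + 1 = ((2 * t + 1) + 1) + 1 := by omega
    simp [Function.comp_apply, e1]
  | case2 l hshape =>
    rcases l with _ | ⟨x, _ | ⟨y, rest⟩⟩
    · rfl
    · simp
    · exact absurd rfl (hshape x y rest)

theorem pyGetD_neg_one (l : List (List Int)) (h : l ≠ []) :
    PySem.List.pyGetD l (-1) [] = l.getD (l.length - 1) [] := by
  have hn : 1 ≤ l.length := List.length_pos_iff.mpr h
  simp only [PySem.List.pyGetD, PySem.List.pyGet?, PySem.List.pyIdx?]
  rw [if_neg (by omega), if_pos (by omega)]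
  simp [List.getD]

theorem main_eq (l : List (List Int)) : oneStepKWayMerge l = oneStepKWayMerge_alt l := by
  by_cases hsmall : l.length ≤ 1
  · rcases l with _ | ⟨x, _ | ⟨y, rest⟩⟩
    · rfl
    · simp only [oneStepKWayMerge, oneStepKWayMerge_alt]
      norm_num
      rw [pyGetD_neg_one _ (by simp)]
      rfl
    · simp at hsmall
  · -- length ≥ 2
    have hn : 2 ≤ l.length := by omega
    have hk : (0 : Int) < (l.length : Int) := by omega
    -- A side: turn the fold into a map over range, with B's merge function
    simp only [oneStepKWayMerge, if_neg hsmall, twoWayMerge_eq_alt]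
    have hbody : (fun (ret : List (List Int)) (i : Int) =>
        if i < (l.length : Int) - 1 then
          ret ++ [twoWayMergeAlt (PySem.List.pyGetD l i []) (PySem.List.pyGetD l (i+1) [])]
        else ret ++ [PySem.List.pyGetD l ((l.length : Int)-1) []])
        = fun ret i => ret ++ [if i < (l.length : Int) - 1 then
            twoWayMergeAlt (PySem.List.pyGetD l i []) (PySem.List.pyGetD l (i+1) [])
          else PySem.List.pyGetD l ((l.length : Int)-1) []] := by
      funext ret i; split <;> rfl
    rw [hbody, PySem.List.foldl_append_singleton_eq_map, List.nil_append]
    rw [PySem.List.pyRange_of_pos _ _ (by norm_num : (0:Int) < 2), if_pos hk]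
    have hc1 : (((l.length : Int) - 0 + 2 - 1)/2).toNat = (l.length+1)/2 := by omega
    rw [hc1, List.map_map]
    -- B side
    rw [oneStepKWayMerge_alt]
    have hcast : ∀ t : Nat, (t : Int) < (l.length : Int) - 1 →
        twoWayMergeAlt (PySem.List.pyGetD l (0 + 2*(t:Int)) []) (PySem.List.pyGetD l (0 + 2*(t:Int) + 1) [])
          = twoWayMergeAlt (l.getD (2*t) []) (l.getD (2*t+1) []) := by
      intro t _
      have e1 : (0 + 2*(t:Int)) = ((2*t : Nat) : Int) := by push_cast; ring
      rw [e1]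
      have e2 : ((2*t : Nat) : Int) + 1 = ((2*t+1 : Nat) : Int) := by push_cast; ring
      rw [e2, PySem.List.pyGetD_natCast, PySem.List.pyGetD_natCast]
    rcases Nat.even_or_odd l.length with ⟨m, hm⟩ | ⟨m, hm⟩
    · -- even: no leftover list; both sides are the m merged pairs
      have h1 : (l.length+1)/2 = m := by omega
      have h2 : l.length/2 = m := by omega
      have hmod : ¬ (l.length % 2 == 1) = true := by simp; omega
      rw [h1, if_neg hmod, ← pairs_map twoWayMergeAlt l, h2]
      refine List.map_congr_left (fun t ht => ?_)
      have ht' : t < m := List.mem_range.mp ht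
      simp only [Function.comp_apply]
      rw [if_pos (by omega)]
      exact hcast t (by omega)
    · -- odd: A's last range entry is the leftover list, B appends list_of_lists[-1]
      have h1 : (l.length+1)/2 = m+1 := by omega
      have h2 : l.length/2 = m := by omega
      have hmod : (l.length % 2 == 1) = true := by simp; omega
      rw [h1, if_pos hmod, List.range_succ, List.map_append, ← pairs_map twoWayMergeAlt l, h2]
      congr 1
      · refine List.map_congr_left (fun t ht => ?_)
        have ht' : t < m := List.mem_range.mp ht
        simp only [Function.comp_apply]
        rw [if_pos (by omega)]
        exact hcast t (by omega)
      · simp only [List.map_cons, List.map_nil, Function.comp_apply]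
        rw [if_neg (by omega)]
        rw [pyGetD_neg_one _ (by intro h; rw [h] at hn; simp at hn)]
        have : ((l.length : Int) - 1) = ((l.length - 1 : Nat) : Int) := by omega
        rw [this, PySem.List.pyGetD_natCast]

-- ===== VERDICT (by name: the statement is the Claim_ definition above) =====
theorem oneStepKWayMerge_spec : Claim_equal_oneStepKWayMerge := by
  intro l _
  unfold Spec_oneStepKWayMerge
  exact main_eq l
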